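-- pv_equiv track=rewrite | github.com/JakobBullinger/YieldOptimizatonTool | Streamlit_4.py | classify_dimension
-- ===== SOURCE A (Python) =====
-- HW_DIMENSIONS = {
--     "43x95","43x138","43x125","43x141","47x92","47x113","47x135","47x153","47x154",
--     "47x175","47x198","47x220","47x221","51x104","36x134","48x117","48x128","48x144",
--     "48x164","69x122","75x148","75x152"
-- }
--
-- SW_DIMENSIONS = {
--     "17x75","17x78","17x100","17x98","23x103","26x146","28x131","28x149","35x155"
-- }
--
-- KH_DIMENSIONS = {
--     "56x76","58x78","60x80","60x90","63x80","65x80","68x98","70x75","75x90","75x95",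
--     "75x98","76x76","76x96","78x78","78x90","78x100","79x100","93x93","96x116","98x98","33x90"
-- }
--
-- def classify_dimension(dim):
--     """
--     Gibt 'HW', 'SW', 'KH' oder 'Unknown' zurück, basierend auf den Dimensionen.
--     """
--     dim_lower = dim.lower().strip()
--     if dim_lower in (d.lower() for d in HW_DIMENSIONS):
--         return "HW"
--     elif dim_lower in (d.lower() for d in SW_DIMENSIONS):
--         return "SW"
--     elif dim_lower in (d.lower() for d in KH_DIMENSIONS):
--         return "KH"
--     else:
--         return "Unknown"
-- ===== SOURCE B (Python) =====
-- _HW = ("43x95","43x138","43x125","43x141","47x92","47x113","47x135","47x153","47x154",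
--        "47x175","47x198","47x220","47x221","51x104","36x134","48x117","48x128","48x144",
--        "48x164","69x122","75x148","75x152")
--
-- _SW = ("17x75","17x78","17x100","17x98","23x103","26x146","28x131","28x149","35x155")
--
-- _KH = ("56x76","58x78","60x80","60x90","63x80","65x80","68x98","70x75","75x90","75x95",
--        "75x98","76x76","76x96","78x78","78x90","78x100","79x100","93x93","96x116","98x98","33x90")
--
-- # one sorted table (dimension, label), built once; all keys are distinct
-- _TABLE = sorted([(d, "HW") for d in _HW] + [(d, "SW") for d in _SW] + [(d, "KH") for d in _KH],
--                 key=lambda p: p[0])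
--
-- def classify_dimension(dim):
--     """
--     Gibt 'HW', 'SW', 'KH' oder 'Unknown' zurück, basierend auf den Dimensionen.
--     """
--     key = dim.lower().strip()
--     lo, hi = 0, len(_TABLE)
--     while lo < hi:                      # binary search on the sorted table
--         mid = (lo + hi) // 2
--         k, lab = _TABLE[mid]
--         if k == key:
--             return lab
--         if k < key:
--             lo = mid + 1
--         else:
--             hi = mid
--     return "Unknown"
-- ===== Notes on version B (the rewrite author's own statement) =====
-- stated objective: alternative
-- what changed: Replaces A's three sequential lowered-generator set-membership branches by one sorted (dimension,label) table built once and a hand-written binary search (lo/hi loop) with 'Unknown' on miss.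
import Mathlib
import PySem

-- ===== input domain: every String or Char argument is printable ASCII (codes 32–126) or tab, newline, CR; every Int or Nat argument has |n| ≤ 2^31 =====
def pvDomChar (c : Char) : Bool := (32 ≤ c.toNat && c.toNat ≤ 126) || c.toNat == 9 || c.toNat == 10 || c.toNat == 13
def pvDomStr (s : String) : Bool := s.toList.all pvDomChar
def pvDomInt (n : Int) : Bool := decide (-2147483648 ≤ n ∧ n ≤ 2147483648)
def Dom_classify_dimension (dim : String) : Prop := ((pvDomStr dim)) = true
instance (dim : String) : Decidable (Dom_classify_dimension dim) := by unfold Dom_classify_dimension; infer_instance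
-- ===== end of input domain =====

-- B replaces A's three sequential set-membership branches by one sorted
-- (dimension,label) table built once and a binary search per call (alternative algorithm).

-- ===== PORT A =====
def HW_DIMENSIONS : PySem.Set String := PySem.Set.ofList
  ["43x95","43x138","43x125","43x141","47x92","47x113","47x135","47x153","47x154",
   "47x175","47x198","47x220","47x221","51x104","36x134","48x117","48x128","48x144",
   "48x164","69x122","75x148","75x152"]

def SW_DIMENSIONS : PySem.Set String := PySem.Set.ofList
  ["17x75","17x78","17x100","17x98","23x103","26x146","28x131","28x149","35x155"]

def KH_DIMENSIONS : PySem.Set String := PySem.Set.ofList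
  ["56x76","58x78","60x80","60x90","63x80","65x80","68x98","70x75","75x90","75x95",
   "75x98","76x76","76x96","78x78","78x90","78x100","79x100","93x93","96x116","98x98","33x90"]

def classify_dimension (dim : String) : String :=
  let dim_lower := PySem.Str.strip (PySem.Str.lower dim)
  if (HW_DIMENSIONS.map PySem.Str.lower).contains dim_lower then "HW"
  else if (SW_DIMENSIONS.map PySem.Str.lower).contains dim_lower then "SW"
  else if (KH_DIMENSIONS.map PySem.Str.lower).contains dim_lower then "KH"
  else "Unknown"

-- ===== PORT B =====
def bHW : List String :=
  ["43x95","43x138","43x125","43x141","47x92","47x113","47x135","47x153","47x154",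
   "47x175","47x198","47x220","47x221","51x104","36x134","48x117","48x128","48x144",
   "48x164","69x122","75x148","75x152"]

def bSW : List String :=
  ["17x75","17x78","17x100","17x98","23x103","26x146","28x131","28x149","35x155"]

def bKH : List String :=
  ["56x76","58x78","60x80","60x90","63x80","65x80","68x98","70x75","75x90","75x95",
   "75x98","76x76","76x96","78x78","78x90","78x100","79x100","93x93","96x116","98x98","33x90"]

-- _TABLE = sorted(pairs, key=lambda p: p[0]); all keys distinct.
-- Python str '<' is code-point lexicographic = Lean '<' on .toList (PYSEM str COMPARISON).
def pvTable : List (String × String) :=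
  PySem.List.sorted
    (bHW.map (fun d => (d, "HW")) ++ bSW.map (fun d => (d, "SW")) ++ bKH.map (fun d => (d, "KH")))
    (fun p => p.1.toList) false

-- the while-loop of B: binary search on the sorted table
def pvBsearch (t : List (String × String)) (key : String) (lo hi : Nat) : String :=
  if _h : lo < hi then
    match t[(lo + hi) / 2]? with
    | some kl =>
        if kl.1 = key then kl.2
        else if kl.1.toList < key.toList then pvBsearch t key ((lo + hi) / 2 + 1) hi
        else pvBsearch t key lo ((lo + hi) / 2)
    | none => "Unknown"   -- unreachable: hi ≤ t.length at every call
  else "Unknown"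
termination_by hi - lo
decreasing_by all_goals omega

def classify_dimension_alt (dim : String) : String :=
  pvBsearch pvTable (PySem.Str.strip (PySem.Str.lower dim)) 0 pvTable.length

-- ===== PRECONDITION & SPEC =====
def Spec_classify_dimension (dim : String) (out : String) : Prop := out = classify_dimension_alt dim
instance (dim : String) (out : String) : Decidable (Spec_classify_dimension dim out) := by unfold Spec_classify_dimension; infer_instance

-- ===== CLAIM (what is proved, stated in full; the proofs are below) =====
def Claim_equal_classify_dimension : Prop := ∀ (dim : String), Dom_classify_dimension dim → Spec_classify_dimension dim (classify_dimension dim)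

-- ===== LEMMAS AND PROOFS =====

theorem lookup_eq_none_of_forall {t : List (String × String)} {key : String}
    (h : ∀ p ∈ t, p.1 ≠ key) : t.lookup key = none := by
  induction t with
  | nil => rfl
  | cons a t ih =>
    have ha : (key == a.1) = false :=
      beq_eq_false_iff_ne.2 (fun hk => (h a List.mem_cons_self) hk.symm)
    simp only [List.lookup, ha]
    exact ih (fun p hp => h p (List.mem_cons_of_mem _ hp))

theorem lookup_eq_some_of_mem {t : List (String × String)} {key lab : String}
    (hs : t.Pairwise (fun a b => a.1.toList < b.1.toList)) (hm : (key, lab) ∈ t) :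
    t.lookup key = some lab := by
  induction t with
  | nil => cases hm
  | cons a t ih =>
    rcases List.mem_cons.1 hm with h | h
    · simp [List.lookup, ← h]
    · have hne : (key == a.1) = false := by
        have hlt := (List.pairwise_cons.1 hs).1 _ h
        exact beq_eq_false_iff_ne.2
          (fun hk => absurd hlt (by rw [hk]; exact lt_irrefl _))
      simp only [List.lookup, hne]
      exact ih (List.pairwise_cons.1 hs).2 h

-- binary search on a strictly key-sorted segment computes first-match lookup
theorem pvBsearch_eq_lookup (t : List (String × String)) (key : String)
    (hs : t.Pairwise (fun a b => a.1.toList < b.1.toList)) :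
    ∀ lo hi : Nat, hi ≤ t.length →
    (∀ i, i < lo → (h : i < t.length) → t[i].1.toList < key.toList) →
    (∀ i, hi ≤ i → (h : i < t.length) → key.toList < t[i].1.toList) →
    pvBsearch t key lo hi = (t.lookup key).getD "Unknown" := by
  have hpg := List.pairwise_iff_getElem.1 hs
  intro lo hi
  induction hn : hi - lo using Nat.strong_induction_on generalizing lo hi with
  | _ n ih =>
  intro hhi hlow hhigh
  rw [pvBsearch]
  by_cases h : lo < hi
  · rw [dif_pos h]
    have hmidlen : (lo + hi) / 2 < t.length := by omega
    rw [List.getElem?_eq_getElem hmidlen]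
    set mid := (lo + hi) / 2 with hmid
    simp only
    by_cases heq : t[mid].1 = key
    · rw [if_pos heq]
      have : t.lookup key = some t[mid].2 := by
        refine lookup_eq_some_of_mem hs ?_
        have hp : (t[mid].1, t[mid].2) = t[mid] := rfl
        rw [← heq, hp]
        exact List.getElem_mem _
      rw [this]
      exact rfl
    · rw [if_neg heq]
      by_cases hlt : t[mid].1.toList < key.toList
      · rw [if_pos hlt]
        refine ih (hi - (mid + 1)) (by omega) (mid + 1) hi rfl hhi ?_ hhigh
        intro i hilt hlen
        rcases Nat.lt_or_ge i mid with hc | hc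
        · exact lt_trans (hpg i mid hlen hmidlen hc) hlt
        · have : i = mid := by omega
          subst this; exact hlt
      · rw [if_neg hlt]
        have hne : key.toList ≠ t[mid].1.toList :=
          fun hk => heq (String.toList_inj.1 hk.symm)
        have hgt : key.toList < t[mid].1.toList := lt_of_le_of_ne (not_lt.1 hlt) hne
        refine ih (mid - lo) (by omega) lo mid rfl (by omega) hlow ?_
        intro i hile hlen
        rcases Nat.lt_or_ge mid i with hc | hc
        · exact lt_trans hgt (hpg mid i hmidlen hlen hc)
        · have : i = mid := by omega
          subst this; exact hgt
  · rw [dif_neg h]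
    have hnone : t.lookup key = none := by
      refine lookup_eq_none_of_forall ?_
      intro p hp hk
      obtain ⟨i, hlen, hip⟩ := List.getElem_of_mem hp
      rcases Nat.lt_or_ge i lo with hc | hc
      · have := hlow i hc hlen
        rw [hip, hk] at this
        exact lt_irrefl _ this
      · have := hhigh i (by omega) hlen
        rw [hip, hk] at this
        exact lt_irrefl _ this
    simp [hnone]

theorem lower_hw : HW_DIMENSIONS.map PySem.Str.lower = bHW := by decide
theorem lower_sw : SW_DIMENSIONS.map PySem.Str.lower = bSW := by decide
theorem lower_kh : KH_DIMENSIONS.map PySem.Str.lower = bKH := by decide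

theorem table_sorted : pvTable.Pairwise (fun a b => a.1.toList < b.1.toList) := by decide

theorem agree_on_keys : ∀ k ∈ pvTable.map Prod.fst,
    ((pvTable.lookup k).getD "Unknown")
      = (if bHW.contains k then "HW"
         else if bSW.contains k then "SW"
         else if bKH.contains k then "KH"
         else "Unknown") := by decide

theorem hw_sub : ∀ k ∈ bHW, k ∈ pvTable.map Prod.fst := by decide
theorem sw_sub : ∀ k ∈ bSW, k ∈ pvTable.map Prod.fst := by decide
theorem kh_sub : ∀ k ∈ bKH, k ∈ pvTable.map Prod.fst := by decide

theorem branch_eq_lookup (k : String) :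
    (if bHW.contains k then "HW"
     else if bSW.contains k then "SW"
     else if bKH.contains k then "KH"
     else "Unknown") = (pvTable.lookup k).getD "Unknown" := by
  by_cases hk : k ∈ pvTable.map Prod.fst
  · exact (agree_on_keys k hk).symm
  · have h1 : bHW.contains k = false := by
      by_contra h
      exact hk (hw_sub k (by simpa using h))
    have h2 : bSW.contains k = false := by
      by_contra h
      exact hk (sw_sub k (by simpa using h))
    have h3 : bKH.contains k = false := by
      by_contra h
      exact hk (kh_sub k (by simpa using h))
    have hnone : pvTable.lookup k = none := by
      refine lookup_eq_none_of_forall ?_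
      intro p hp hkeq
      exact hk (hkeq ▸ List.mem_map_of_mem hp)
    rw [h1, h2, h3, hnone]
    rfl

-- ===== VERDICT (by name: the statement is the Claim_ definition above) =====
theorem classify_dimension_spec : Claim_equal_classify_dimension := by
  intro dim _
  unfold Spec_classify_dimension classify_dimension classify_dimension_alt
  rw [lower_hw, lower_sw, lower_kh]
  rw [pvBsearch_eq_lookup pvTable _ table_sorted 0 pvTable.length le_rfl
        (by omega) (by intro i h1 h2; omega)]
  exact branch_eq_lookup _
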